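-- pv_equiv track=rewrite | github.com/Munbin-Lee/Programmers | 프로그래머스/1/42840. 모의고사/모의고사.py | solution
-- ===== SOURCE A (Python) =====
-- class Student:
--     id = -1
--     pattern = []
--     current_pattern_index = 0
--     score = 0
--
--     def __init__(self, id, pattern):
--         self.id = id
--         self.pattern = pattern
--
--     def solve(self, answer):
--         if answer == self.pattern[self.current_pattern_index]:
--             self.score += 1
--         self.current_pattern_index += 1
--         self.current_pattern_index %= len(self.pattern)
--
-- def solution(answers):
--     students = [
--         Student(1, [1, 2, 3, 4, 5]),
--         Student(2, [2, 1, 2, 3, 2, 4, 2, 5]),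
--         Student(3, [3, 3, 1, 1, 2, 2, 4, 4, 5, 5])
--     ]
--
--     for answer in answers:
--         for student in students:
--             student.solve(answer)
--
--     maxScore = -1
--     maxStudents = []
--
--     for student in students:
--         if student.score > maxScore:
--             maxScore = student.score
--             maxStudents = [student.id]
--         elif student.score == maxScore:
--             maxStudents.append(student.id)
--
--     return maxStudents
-- ===== SOURCE B (Python) =====
-- def solution(answers):
--     patterns = [
--         [1, 2, 3, 4, 5],
--         [2, 1, 2, 3, 2, 4, 2, 5],
--         [3, 3, 1, 1, 2, 2, 4, 4, 5, 5],
--     ]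
--     scores = []
--     for p in patterns:
--         total = 0
--         i = 0
--         while i < len(answers):
--             total += sum(x == y for x, y in zip(answers[i:i + len(p)], p))
--             i += len(p)
--         scores.append(total)
--     best = max(scores)
--     return [i + 1 for i, s in enumerate(scores) if s == best]
-- ===== Notes on version B (the rewrite author's own statement) =====
-- stated objective: alternative
-- what changed: Replaces the Student objects with their per-answer mutated current-index/score state machine by blockwise scoring: each pattern is zip-compared against one pattern-length chunk of answers at a time (a while loop advancing a start index by len(p)), then max(scores) and an enumerate comprehension keep ascending ids on ties.
import Mathlib
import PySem

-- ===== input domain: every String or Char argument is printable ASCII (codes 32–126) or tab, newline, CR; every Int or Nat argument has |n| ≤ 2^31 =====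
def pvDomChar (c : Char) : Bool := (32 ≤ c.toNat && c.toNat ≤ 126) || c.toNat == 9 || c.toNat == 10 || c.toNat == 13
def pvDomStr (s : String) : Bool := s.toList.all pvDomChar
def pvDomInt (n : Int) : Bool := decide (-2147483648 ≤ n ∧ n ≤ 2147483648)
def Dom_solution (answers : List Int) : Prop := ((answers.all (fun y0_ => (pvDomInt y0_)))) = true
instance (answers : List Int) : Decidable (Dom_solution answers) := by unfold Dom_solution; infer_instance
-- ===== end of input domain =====

-- B drops the Student class and its per-answer index/score state machine: it scores each
-- fixed pattern by repeatedly zip-comparing the remaining answers with the pattern and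
-- advancing a start index one pattern-length block at a time, then keeps the ids achieving max(scores)
-- (objective: alternative decomposition; same O(n) cost).


-- ===== PORT A =====
-- Student.solve: mutates (current_pattern_index, score); pattern[idx] is always in
-- range (0 ≤ idx < len, maintained by the % len update), so '.getD 0' never fires.
def pySolveA (pat : List Int) (st : Int × Int) (a : Int) : Int × Int :=
  let score := if a = (PySem.List.pyGet? pat st.1).getD 0 then st.2 + 1 else st.2
  (PySem.Int.mod (st.1 + 1) (pat.length : Int), score)

def solution (answers : List Int) : List Int :=
  let st1 := answers.foldl (pySolveA [1, 2, 3, 4, 5]) (0, 0)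
  let st2 := answers.foldl (pySolveA [2, 1, 2, 3, 2, 4, 2, 5]) (0, 0)
  let st3 := answers.foldl (pySolveA [3, 3, 1, 1, 2, 2, 4, 4, 5, 5]) (0, 0)
  -- final loop: running max score with ascending-id tie collection
  let sel := [((1 : Int), st1.2), (2, st2.2), (3, st3.2)].foldl
    (fun (acc : Int × List Int) s =>
      if s.2 > acc.1 then (s.2, [s.1])
      else if s.2 = acc.1 then (acc.1, acc.2 ++ [s.1])
      else acc) (-1, [])
  sel.2

-- ===== PORT B =====
-- sum(x == y for x, y in zip(rest, p)): sum of the generator's 0/1 values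
def zipCount (rest p : List Int) : Int :=
  ((rest.zip p).map (fun q => if q.1 = q.2 then (1 : Int) else 0)).sum

-- the 'while i < len(answers): … i += len(p)' loop; fuel = len(answers) only makes the
-- recursion structural (i advances by len(p) ≥ 1 per iteration, so fuel never runs out)
def chunkScoreAux (p answers : List Int) : Nat → Nat → Int
  | 0, _ => 0
  | f + 1, i =>
      if i < answers.length then
        zipCount (PySem.List.slice answers (some (i : Int)) (some ((i : Int) + (p.length : Int)))) p +
          chunkScoreAux p answers f (i + p.length)
      else 0

def chunkScore (p answers : List Int) : Int := chunkScoreAux p answers answers.length 0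

def solution_alt (answers : List Int) : List Int :=
  let scores := [chunkScore [1, 2, 3, 4, 5] answers,
                 chunkScore [2, 1, 2, 3, 2, 4, 2, 5] answers,
                 chunkScore [3, 3, 1, 1, 2, 2, 4, 4, 5, 5] answers]
  let best := (PySem.List.max? scores (fun x => x)).getD 0
  (PySem.List.enumerate scores 0).foldl
    (fun acc p => if p.2 = best then acc ++ [p.1 + 1] else acc) []

-- ===== PRECONDITION & SPEC =====
def Spec_solution (answers : List Int) (out : List Int) : Prop := out = solution_alt answers
instance (answers : List Int) (out : List Int) : Decidable (Spec_solution answers out) := by unfold Spec_solution; infer_instance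

-- ===== CLAIM (what is proved, stated in full; the proofs are below) =====
def Claim_equal_solution : Prop := ∀ (answers : List Int), Dom_solution answers → Spec_solution answers (solution answers)

-- ===== LEMMAS AND PROOFS =====

-- common characterisation: matches of xs against p read cyclically from index i
def M (p : List Int) : Nat → List Int → Int
  | _, [] => 0
  | i, a :: t => (if a = p.getD i 0 then 1 else 0) + M p ((i + 1) % p.length) t

theorem pymod_step (L i : Nat) :
    PySem.Int.mod ((i % L : Nat) + 1) (L : Nat) = (((i + 1) % L : Nat) : Int) := by
  have hmod : (i % L + 1) % L = (i + 1) % L := by simp [Nat.add_mod]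
  calc PySem.Int.mod ((i % L : Nat) + 1) (L : Nat)
      = PySem.Int.mod ((i % L + 1 : Nat) : Int) (L : Nat) := by norm_cast
    _ = (((i % L + 1) % L : Nat) : Int) := PySem.Int.mod_natCast _ _
    _ = (((i + 1) % L : Nat) : Int) := by rw [hmod]

theorem A_agree (pat : List Int) (hpat : pat ≠ []) :
    ∀ (answers : List Int) (i : Nat) (s : Int),
      (answers.foldl (pySolveA pat) (((i % pat.length : Nat) : Int), s)).2 =
        s + M pat (i % pat.length) answers := by
  intro answers
  induction answers with
  | nil => intro i s; simp [M]
  | cons a as ih =>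
    intro i s
    have hL : 0 < pat.length := List.length_pos_iff.mpr hpat
    have hlt : i % pat.length < pat.length := Nat.mod_lt _ hL
    have hst : pySolveA pat (((i % pat.length : Nat) : Int), s) a =
        ((((i + 1) % pat.length : Nat) : Int),
          s + if a = pat.getD (i % pat.length) 0 then 1 else 0) := by
      unfold pySolveA
      rw [pymod_step pat.length i]
      have hg : PySem.List.pyGet? pat ((i % pat.length : Nat) : Int) = pat[(i % pat.length)]? :=
        PySem.List.pyGet?_natCast pat (i % pat.length)
      rw [hg, List.getD_eq_getElem?_getD]
      split <;> simp
    rw [List.foldl_cons, hst, ih (i + 1)]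
    have hmm : (i % pat.length + 1) % pat.length = (i + 1) % pat.length := by
      simp [Nat.add_mod]
    rw [show M pat (i % pat.length) (a :: as) =
          (if a = pat.getD (i % pat.length) 0 then (1:Int) else 0) +
            M pat ((i % pat.length + 1) % pat.length) as from rfl, hmm]
    ring

theorem M_split (p : List Int) (_hL : 0 < p.length) :
    ∀ (xs : List Int) (i : Nat), i < p.length →
      M p i xs = zipCount xs (p.drop i) + M p 0 (xs.drop (p.length - i)) := by
  intro xs
  induction xs with
  | nil => intro i hi; simp [M, zipCount]
  | cons a t ih =>
    intro i hi
    have hdrop : p.drop i = p[i] :: p.drop (i + 1) := List.drop_eq_getElem_cons hi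
    have hget : p.getD i 0 = p[i] := by
      rw [List.getD_eq_getElem?_getD, List.getElem?_eq_getElem hi]; rfl
    by_cases hcase : i + 1 < p.length
    · have h1 : (i + 1) % p.length = i + 1 := Nat.mod_eq_of_lt hcase
      have h2 : p.length - i = (p.length - (i + 1)) + 1 := by omega
      rw [show M p i (a :: t) = (if a = p.getD i 0 then (1:Int) else 0) + M p ((i+1) % p.length) t from rfl,
        h1, ih (i + 1) hcase, hdrop, hget, h2]
      simp only [List.drop_succ_cons, zipCount, List.zip_cons_cons, List.map_cons, List.sum_cons]
      ring
    · have hi1 : i + 1 = p.length := by omega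
      have h0 : (i + 1) % p.length = 0 := by rw [hi1]; simp
      have hdropp : p.drop (i + 1) = [] := by
        apply List.drop_eq_nil_of_le; omega
      have hlen1 : p.length - i = 1 := by omega
      rw [show M p i (a :: t) = (if a = p.getD i 0 then (1:Int) else 0) + M p ((i+1) % p.length) t from rfl,
        h0, hdrop, hget, hdropp, hlen1]
      simp [zipCount]

theorem zip_take {α β : Type} (p : List β) :
    ∀ (xs : List α), xs.zip p = (xs.take p.length).zip p := by
  induction p with
  | nil => intro xs; simp
  | cons b q ih =>
    intro xs
    cases xs with
    | nil => rfl
    | cons a t => simp [List.zip_cons_cons, ih t]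

theorem B_agree (p answers : List Int) (hL : 0 < p.length) :
    ∀ (fuel i : Nat), answers.length - i ≤ fuel →
      chunkScoreAux p answers fuel i = M p 0 (answers.drop i) := by
  intro fuel
  induction fuel with
  | zero =>
    intro i h
    have : answers.drop i = [] := List.drop_eq_nil_of_le (by omega)
    rw [this]; rfl
  | succ f ih =>
    intro i h
    rw [show chunkScoreAux p answers (f + 1) i =
          (if i < answers.length then
            zipCount (PySem.List.slice answers (some (i : Int)) (some ((i : Int) + (p.length : Int)))) p +
              chunkScoreAux p answers f (i + p.length)
          else 0) from rfl]
    by_cases hi : i < answers.length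
    · rw [if_pos hi, PySem.List.slice_natCast_add, ih (i + p.length) (by omega)]
      have hsplit := M_split p hL (answers.drop i) 0 hL
      simp only [List.drop_zero, Nat.sub_zero, List.drop_drop] at hsplit
      have hz : zipCount ((answers.drop i).take p.length) p = zipCount (answers.drop i) p := by
        simp only [zipCount]
        rw [← zip_take p (answers.drop i)]
      rw [hz]
      omega
    · rw [if_neg hi]
      have : answers.drop i = [] := List.drop_eq_nil_of_le (by omega)
      rw [this]; rfl

theorem score_top (pat : List Int) (hpat : pat ≠ []) (answers : List Int) :
    (answers.foldl (pySolveA pat) (0, 0)).2 = chunkScore pat answers := by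
  have hL : 0 < pat.length := List.length_pos_iff.mpr hpat
  have hA := A_agree pat hpat answers 0 0
  have hB := B_agree pat answers hL answers.length 0 (by omega)
  simp only [Nat.zero_mod, Nat.cast_zero, zero_add] at hA
  rw [chunkScore, hB]
  simpa using hA

theorem M_nonneg (p : List Int) : ∀ (i : Nat) (xs : List Int), 0 ≤ M p i xs := by
  intro i xs
  induction xs generalizing i with
  | nil => simp [M]
  | cons a t ih =>
    have := ih ((i + 1) % p.length)
    show 0 ≤ (if a = p.getD i 0 then (1:Int) else 0) + M p ((i + 1) % p.length) t
    split <;> omega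

theorem chunkScore_nonneg (p : List Int) (hL : 0 < p.length) (answers : List Int) :
    0 ≤ chunkScore p answers := by
  rw [chunkScore, B_agree p answers hL answers.length 0 (by omega)]
  exact M_nonneg p 0 (answers.drop 0)

theorem sel_agree (s1 s2 s3 : Int) (h1 : 0 ≤ s1) :
    ([((1 : Int), s1), (2, s2), (3, s3)].foldl
      (fun (acc : Int × List Int) s =>
        if s.2 > acc.1 then (s.2, [s.1])
        else if s.2 = acc.1 then (acc.1, acc.2 ++ [s.1])
        else acc) (-1, [])).2 =
    (PySem.List.enumerate [s1, s2, s3] 0).foldl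
      (fun acc p => if p.2 = (PySem.List.max? [s1, s2, s3] (fun x => x)).getD 0
                    then acc ++ [p.1 + 1] else acc) [] := by
  rw [PySem.List.max?_id_cons]
  simp only [List.foldl_cons, List.foldl_nil, PySem.List.enumerate_cons,
    PySem.List.enumerate_nil, Option.getD_some]
  norm_num
  split_ifs <;> first | rfl | omega

-- ===== VERDICT (by name: the statement is the Claim_ definition above) =====
theorem solution_spec : Claim_equal_solution := by
  intro answers _
  unfold Spec_solution solution solution_alt
  simp only [score_top [1, 2, 3, 4, 5] (by decide) answers,
    score_top [2, 1, 2, 3, 2, 4, 2, 5] (by decide) answers,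
    score_top [3, 3, 1, 1, 2, 2, 4, 4, 5, 5] (by decide) answers]
  exact sel_agree _ _ _ (chunkScore_nonneg _ (by decide) _)
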